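-- pv_equiv track=rewrite | github.com/GitHubOfAndrew/CS88-Code | lab07.py | sum_diffs
-- ===== SOURCE A (Python) =====
-- def sum_diffs(n):
--     """ Return the sum of the differences between adjacent digits in the number n.
--
--     >>> sum_diffs(8)
--     0
--     >>> sum_diffs(154) # 4 + 1 = 5
--     5
--     >>> sum_diffs(12321) # 1 + 1 + 1 + 1
--     4
--     >>> sum_diffs(7351) # 4 + 2 + 4
--     10
--     """
--     counter = 0
--     if n < 10:
--         return counter
--     else:
--         digi_first, digi_second = n%10, (n//10)%10
--         li = [digi_first, digi_second]
--         return max(li) - min(li) + sum_diffs(n//10)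
-- ===== SOURCE B (Python) =====
-- def sum_diffs(n):
--     if n < 10:
--         return 0
--     s = str(n)
--     return sum(abs(int(a) - int(b)) for a, b in zip(s, s[1:]))
-- ===== Notes on version B (the rewrite author's own statement) =====
-- stated objective: idiomatic
-- what changed: Replaces the pairwise max/min arithmetic recursion on the two lowest digits by a single forward pass over str(n) summing abs differences of adjacent digit characters with zip.
import Mathlib
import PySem

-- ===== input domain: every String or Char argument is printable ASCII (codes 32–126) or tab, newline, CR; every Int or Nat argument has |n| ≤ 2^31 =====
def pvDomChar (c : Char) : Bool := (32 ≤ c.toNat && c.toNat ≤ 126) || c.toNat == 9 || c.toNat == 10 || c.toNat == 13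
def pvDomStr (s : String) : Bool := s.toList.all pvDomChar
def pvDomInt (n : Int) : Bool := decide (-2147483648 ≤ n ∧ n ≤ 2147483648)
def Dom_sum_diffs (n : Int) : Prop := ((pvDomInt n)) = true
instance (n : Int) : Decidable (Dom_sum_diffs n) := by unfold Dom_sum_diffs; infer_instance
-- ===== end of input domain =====

-- B replaces A's max/min arithmetic recursion by a single forward pass over str(n)
-- summing absolute differences of adjacent digit characters (more idiomatic, same cost).


-- ===== PORT A =====
def sum_diffs (n : Int) : Int :=
  if n < 10 then 0
  else
    let digi_first := PySem.Int.mod n 10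
    let digi_second := PySem.Int.mod (PySem.Int.floordiv n 10) 10
    -- Python's max(li) / min(li) on the two-element list li = [digi_first, digi_second]: exact
    (max digi_first digi_second - min digi_first digi_second) +
      sum_diffs (PySem.Int.floordiv n 10)
termination_by n.toNat
decreasing_by
  rw [PySem.Int.floordiv_eq_ediv_of_pos (by norm_num)]
  omega

-- ===== PORT B =====
-- int(a) for a single decimal digit character a (the only characters it is applied to): exact there
def pvDigitVal (c : Char) : Int := (c.toNat : Int) - 48

-- sum(abs(int(a) - int(b)) for a, b in zip(s, s[1:])) over a character list s
def pvPairSum (s : List Char) : Int :=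
  ((s.zip s.tail).map (fun p => |pvDigitVal p.1 - pvDigitVal p.2|)).sum

def sum_diffs_alt (n : Int) : Int :=
  if n < 10 then 0
  else pvPairSum (PySem.Int.toChars n)   -- s = str(n), per the List Char convention

-- ===== PRECONDITION & SPEC =====
def Spec_sum_diffs (n : Int) (out : Int) : Prop := out = sum_diffs_alt n
instance (n : Int) (out : Int) : Decidable (Spec_sum_diffs n out) := by unfold Spec_sum_diffs; infer_instance

-- ===== CLAIM (what is proved, stated in full; the proofs are below) =====
def Claim_equal_sum_diffs : Prop := ∀ (n : Int), Dom_sum_diffs n → Spec_sum_diffs n (sum_diffs n)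

-- ===== LEMMAS AND PROOFS =====
theorem pvPairSum_singleton (a : Char) : pvPairSum [a] = 0 := rfl

theorem pvPairSum_cons_cons (a b : Char) (t : List Char) :
    pvPairSum (a :: b :: t) = |pvDigitVal a - pvDigitVal b| + pvPairSum (b :: t) := by
  simp [pvPairSum]

theorem pvPairSum_append_singleton (l : List Char) (c : Char) (h : l ≠ []) :
    pvPairSum (l ++ [c]) = pvPairSum l + |pvDigitVal (l.getLast?.getD '0') - pvDigitVal c| := by
  induction l with
  | nil => exact absurd rfl h
  | cons a t ih =>
    cases t with
    | nil => simp [pvPairSum]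
    | cons b t' =>
      simp only [List.cons_append] at ih ⊢
      rw [pvPairSum_cons_cons, ih (by simp), pvPairSum_cons_cons,
        List.getLast?_cons_cons]
      ring

theorem pvGetLast_toDigits (m : Nat) :
    (Nat.toDigits 10 m).getLast? = some (Nat.digitChar (m % 10)) := by
  rw [Nat.toDigits_eq_if (by norm_num)]
  split
  · next h => rw [Nat.mod_eq_of_lt h]; rfl
  · exact List.getLast?_concat

theorem pvDigitVal_digitChar (d : Nat) (h : d < 10) :
    pvDigitVal (Nat.digitChar d) = (d : Int) := by
  interval_cases d <;> rfl

theorem pvMain (m : Nat) : sum_diffs (m : Int) = pvPairSum (Nat.toDigits 10 m) := by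
  induction m using Nat.strong_induction_on with
  | _ m ih =>
    by_cases h : m < 10
    · rw [sum_diffs, if_pos (by exact_mod_cast h), Nat.toDigits_of_lt_base h,
        pvPairSum_singleton]
    · push Not at h
      rw [sum_diffs, if_neg (by omega)]
      rw [Nat.toDigits_eq_if (by norm_num), if_neg (by omega),
        pvPairSum_append_singleton _ _
          (List.ne_nil_of_length_pos Nat.length_toDigits_pos),
        pvGetLast_toDigits, Option.getD_some,
        pvDigitVal_digitChar _ (Nat.mod_lt _ (by norm_num)),
        pvDigitVal_digitChar _ (Nat.mod_lt _ (by norm_num))]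
      have hfd : PySem.Int.floordiv (m : Int) 10 = ((m / 10 : Nat) : Int) := by
        exact_mod_cast PySem.Int.floordiv_natCast m 10
      have hm1 : PySem.Int.mod (m : Int) 10 = ((m % 10 : Nat) : Int) := by
        exact_mod_cast PySem.Int.mod_natCast m 10
      have hm2 : PySem.Int.mod ((m / 10 : Nat) : Int) 10 = ((m / 10 % 10 : Nat) : Int) := by
        exact_mod_cast PySem.Int.mod_natCast (m / 10) 10
      rw [hfd, hm1, hm2, ih (m / 10) (Nat.div_lt_self (by omega) (by norm_num))]
      simp only [max_sub_min_eq_abs]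
      rw [abs_sub_comm]
      ring

-- ===== VERDICT (by name: the statement is the Claim_ definition above) =====
theorem sum_diffs_spec : Claim_equal_sum_diffs := by
  intro n _
  unfold Spec_sum_diffs
  by_cases h : n < 10
  · rw [sum_diffs, sum_diffs_alt, if_pos h, if_pos h]
  · push Not at h
    have hn : n = (n.toNat : Int) := (Int.toNat_of_nonneg (by omega)).symm
    rw [sum_diffs_alt, if_neg (by omega), hn, pvMain,
      PySem.Int.toChars, if_neg (by omega), Int.toNat_natCast]
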